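-- pv_equiv track=rewrite | github.com/mal1on/checkio-solutions | Initiation/Remove_All_Before.py | remove_all_before
-- ===== SOURCE A (Python) =====
-- from typing import Iterable
--
-- def remove_all_before(items: list, border: int) -> Iterable:
--
--     result = items[::-1]
--
--     if border in items:
--         for item in items:
--             if item != border:
--                 result.pop()
--             else:
--                 break
--     else:
--         result = items[::-1]
--
--     return result[::-1]
-- ===== SOURCE B (Python) =====
-- def remove_all_before(items: list, border: int):
--     if border in items:
--         return items[items.index(border):]
--     return items[:]
-- ===== Notes on version B (the rewrite author's own statement) =====
-- stated objective: simpler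
-- what changed: Replaces A's three-pass reverse/pop-loop/reverse scheme with a single index lookup and one slice (full copy when the border is absent).
import Mathlib
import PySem

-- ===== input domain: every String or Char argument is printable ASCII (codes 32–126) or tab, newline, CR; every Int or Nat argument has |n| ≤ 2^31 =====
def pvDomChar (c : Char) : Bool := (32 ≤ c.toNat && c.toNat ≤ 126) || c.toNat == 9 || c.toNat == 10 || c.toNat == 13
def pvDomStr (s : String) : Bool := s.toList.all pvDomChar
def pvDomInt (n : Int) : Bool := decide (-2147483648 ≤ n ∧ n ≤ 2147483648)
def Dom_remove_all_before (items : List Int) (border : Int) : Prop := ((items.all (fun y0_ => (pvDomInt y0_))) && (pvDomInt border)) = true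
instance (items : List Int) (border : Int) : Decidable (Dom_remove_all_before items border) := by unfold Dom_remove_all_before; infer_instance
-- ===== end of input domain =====

-- B replaces A's reverse / pop-loop / reverse scheme with one index lookup and a slice (simpler).

-- ===== PORT A =====
-- the 'for item in items: if item != border: result.pop() else: break' loop;
-- result.pop() is PySem.List.pop? with default index -1; the 'none' (empty-list
-- IndexError) branch is unreachable because the loop breaks at the border.
def removeLoopA (border : Int) : List Int → List Int → List Int
  | [], result => result
  | item :: rest, result =>
    if item ≠ border then
      match PySem.List.pop? result (-1) with
      | some (_, r) => removeLoopA border rest r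
      | none => result  -- unreachable (Python raises IndexError here)
    else result

def remove_all_before (items : List Int) (border : Int) : List Int :=
  let result := (PySem.List.slice? items none none (-1)).getD []      -- items[::-1]
  let result :=
    if items.contains border then removeLoopA border items result
    else (PySem.List.slice? items none none (-1)).getD []             -- items[::-1]
  (PySem.List.slice? result none none (-1)).getD []                   -- result[::-1]

-- ===== PORT B =====
def remove_all_before_alt (items : List Int) (border : Int) : List Int :=
  if items.contains border then
    match PySem.List.index? items border with
    | some i => PySem.List.slice items (some (i : Int)) none          -- items[items.index(border):]
    | none => items  -- unreachable: border ∈ items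
  else items                                                          -- items[:]

-- ===== PRECONDITION & SPEC =====
def Spec_remove_all_before (items : List Int) (border : Int) (out : List Int) : Prop := out = remove_all_before_alt items border
instance (items : List Int) (border : Int) (out : List Int) : Decidable (Spec_remove_all_before items border out) := by unfold Spec_remove_all_before; infer_instance

-- ===== CLAIM (what is proved, stated in full; the proofs are below) =====
def Claim_equal_remove_all_before : Prop := ∀ (items : List Int) (border : Int), Dom_remove_all_before items border → Spec_remove_all_before items border (remove_all_before items border)

-- ===== LEMMAS AND PROOFS =====

lemma loopA_eq : ∀ (l : List Int) (b : Int) (i : Nat),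
    PySem.List.index? l b = some i → removeLoopA b l l.reverse = (l.drop i).reverse := by
  intro l
  induction l with
  | nil => intro b i h; simp [PySem.List.index?] at h
  | cons x xs ih =>
    intro b i h
    by_cases hx : x = b
    · subst hx
      rw [PySem.List.index?_cons_self] at h
      cases h
      simp [removeLoopA]
    · rw [PySem.List.index?_cons_of_ne xs hx] at h
      cases hj : PySem.List.index? xs b with
      | none => rw [hj] at h; simp at h
      | some j =>
        rw [hj] at h
        simp at h
        subst h
        have hpop : PySem.List.pop? ((x :: xs).reverse) (-1) = some (x, xs.reverse) := by
          have : (x :: xs).reverse = xs.reverse ++ [x] := by simp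
          rw [this, PySem.List.pop?_last]
        simp only [removeLoopA, if_pos (fun h' : x = b => hx h'), hpop]
        rw [ih b j hj]
        simp

-- ===== VERDICT (by name: the statement is the Claim_ definition above) =====
theorem remove_all_before_spec : Claim_equal_remove_all_before := by
  intro items border _
  unfold Spec_remove_all_before remove_all_before remove_all_before_alt
  simp only [PySem.List.slice?_none_none_neg_one, Option.getD_some]
  by_cases hmem : border ∈ items
  · have hc : items.contains border = true := by simpa using hmem
    rw [hc]
    have hsome : (PySem.List.index? items border).isSome := by
      rw [PySem.List.index?_isSome_iff]; exact hmem
    obtain ⟨i, hi⟩ := Option.isSome_iff_exists.mp hsome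
    simp only [hi]
    rw [loopA_eq items border i hi]
    rw [PySem.List.slice_from_natCast]
    simp
  · have hc : items.contains border = false := by simpa using hmem
    rw [hc]
    simp
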